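-- pv_equiv track=rewrite | github.com/HashtagProg/study | 202412/수열과 구간 쿼리4.py | solution
-- ===== SOURCE A (Python) =====
-- def solution(arr, queries):
--     answer = []
--
--     for i,j,z in queries:
--         for idx in range(i, j + 1):
--             if i <= idx <= j and idx % z == 0:
--                 arr[idx] += 1
--     answer = arr
--
--     return answer
-- ===== SOURCE B (Python) =====
-- def solution(arr, queries):
--     cnt = {}
--     for i, j, z in queries:
--         if i > j:
--             continue
--         w = abs(z)
--         start = -((-i) // w) * w
--         for k in range(start, j + 1, w):
--             cnt[k] = cnt.get(k, 0) + 1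
--     for n in range(len(arr)):
--         arr[n] += cnt.get(n, 0)
--     return arr
-- ===== Notes on version B (the rewrite author's own statement) =====
-- stated objective: alternative
-- what changed: B never scans a query's full index range with a divisibility test: it generates exactly the multiples of |z| in [i,j] arithmetically (first multiple via ceiling division, then stepping by |z|), accumulates them in a dict of per-index increment counts, and applies that dict to arr in one final pass (mutating arr in place); A sweeps every index of every range and tests idx % z == 0.
-- intended difference: On inputs where some query's range [i,j] contains a negative index divisible by z, A wraps around and increments arr[len+idx] (Python negative indexing) while B's final pass only applies counts at true positions 0..len-1; B's is the intended behaviour for a range-increment task. — e.g. on solution([0, 0], [(-1, -1, 1)]): A returns [0, 1], B returns [0, 0]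
import Mathlib
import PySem

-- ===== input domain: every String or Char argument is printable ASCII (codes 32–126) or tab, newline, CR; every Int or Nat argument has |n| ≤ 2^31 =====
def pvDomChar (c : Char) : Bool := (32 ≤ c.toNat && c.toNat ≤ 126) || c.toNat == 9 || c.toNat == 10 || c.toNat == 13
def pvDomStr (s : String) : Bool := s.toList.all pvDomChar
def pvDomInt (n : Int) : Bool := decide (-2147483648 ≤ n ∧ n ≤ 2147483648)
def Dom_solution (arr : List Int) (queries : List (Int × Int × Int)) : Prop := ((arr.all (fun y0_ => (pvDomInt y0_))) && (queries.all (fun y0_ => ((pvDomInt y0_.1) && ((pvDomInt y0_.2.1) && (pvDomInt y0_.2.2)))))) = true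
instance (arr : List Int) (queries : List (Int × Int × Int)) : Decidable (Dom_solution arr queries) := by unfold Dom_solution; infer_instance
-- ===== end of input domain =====

-- B builds a dict of per-index increment counts from arithmetically generated multiples and applies
-- it in one pass, instead of A's per-query sweep with a divisibility test; equivalence is about the
-- return value — both Pythons mutate arr in place and return it, but inside D_ A additionally
-- mutates a wrapped (negative-index) entry that B leaves alone.

-- ===== PORT A =====
-- `arr[idx] += 1` (Python negative indices wrap)
def pvBump (a : List Int) (idx : Int) : List Int :=
  PySem.List.pySetD a idx (PySem.List.pyGetD a idx 0 + 1)

def solution (arr : List Int) (queries : List (Int × Int × Int)) : List Int :=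
  -- `answer = []` is dead; the loops mutate arr and `answer = arr; return answer` returns it
  queries.foldl (fun a q =>
    (PySem.List.pyRange q.1 (q.2.1 + 1) 1).foldl (fun a idx =>
      if q.1 ≤ idx ∧ idx ≤ q.2.1 ∧ PySem.Int.mod idx q.2.2 = 0 then pvBump a idx else a) a) arr

-- ===== PORT B =====
-- the indices a query (i,j,z) increments: `range(start, j+1, w)` with w = abs(z) and
-- start = -((-i)//w)*w the first multiple of w that is ≥ i (empty when i > j: `continue`)
def pvHits (q : Int × Int × Int) : List Int :=
  if q.1 > q.2.1 then []
  else
    let w := |q.2.2|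
    let start := -(PySem.Int.floordiv (-q.1) w) * w
    PySem.List.pyRange start (q.2.1 + 1) w

def solution_alt (arr : List Int) (queries : List (Int × Int × Int)) : List Int :=
  -- cnt = {}; for each query: for k in its hit list: cnt[k] = cnt.get(k, 0) + 1
  let cnt : PySem.Dict Int Int :=
    queries.foldl (fun d q => (pvHits q).foldl (fun d k => d.modify k 0 (· + 1)) d) PySem.Dict.empty
  -- for n in range(len(arr)): arr[n] += cnt.get(n, 0)
  (PySem.List.pyRange 0 (arr.length : Int) 1).foldl
    (fun a n => PySem.List.pySetD a n (PySem.List.pyGetD a n 0 + cnt.getD n 0)) arr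

-- ===== PRECONDITION & SPEC =====
-- Pre_ = exactly the inputs where A raises no exception: a nonempty query range needs z ≠ 0
-- (else ZeroDivisionError), and every index the query increments must be a valid Python index
-- of arr (else IndexError).
-- 'some multiple of w lies in [a,b]' decided arithmetically: the largest multiple of w that is ≤ b is w*(b//w)
abbrev pvHasMult (a b w : Int) : Prop := a ≤ b ∧ a ≤ w * (PySem.Int.floordiv b w)

def Pre_solution (arr : List Int) (queries : List (Int × Int × Int)) : Prop :=
  ∀ q ∈ queries, (q.1 ≤ q.2.1 → q.2.2 ≠ 0) ∧
    ¬ pvHasMult q.1 (min q.2.1 (-(arr.length : Int) - 1)) |q.2.2| ∧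
    ¬ pvHasMult (max q.1 (arr.length : Int)) q.2.1 |q.2.2|
instance (arr : List Int) (queries : List (Int × Int × Int)) : Decidable (Pre_solution arr queries) := by unfold Pre_solution; infer_instance

def pvWitness_solution : List Int × (List (Int × Int × Int)) := ([5, 7], [(0, 1, 2)])

-- On queries whose range [i,j] contains a negative index divisible by z, A wraps around and
-- increments arr[len+idx] (Python negative indexing) while B increments only true positions
-- idx ≥ 0; B's is the intended behaviour for a range-increment task.
def D_solution (arr : List Int) (queries : List (Int × Int × Int)) : Prop :=
  ∃ q ∈ queries, q.2.2 ≠ 0 ∧ pvHasMult q.1 (min q.2.1 (-1)) |q.2.2|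
instance (arr : List Int) (queries : List (Int × Int × Int)) : Decidable (D_solution arr queries) := by unfold D_solution; infer_instance

def Spec_solution (arr : List Int) (queries : List (Int × Int × Int)) (out : List Int) : Prop := ¬ D_solution arr queries → out = solution_alt arr queries
instance (arr : List Int) (queries : List (Int × Int × Int)) (out : List Int) : Decidable (Spec_solution arr queries out) := by unfold Spec_solution; infer_instance

def pvDiffWitness_solution : List Int × (List (Int × Int × Int)) := ([0, 0], [(-1, -1, 1)])
def pvDiffWitnessOut_solution : (List Int) × (List Int) := ([0, 1], [0, 0])

-- ===== CLAIM (what is proved, stated in full; the proofs are below) =====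
def Claim_unchanged_solution : Prop := ∀ (arr : List Int) (queries : List (Int × Int × Int)), Dom_solution arr queries → Pre_solution arr queries → Spec_solution arr queries (solution arr queries)
def Claim_exact_solution : Prop := ∀ (arr : List Int) (queries : List (Int × Int × Int)), Dom_solution arr queries → Pre_solution arr queries → D_solution arr queries → solution arr queries ≠ solution_alt arr queries
def Claim_changed_solution : Prop := Dom_solution (pvDiffWitness_solution.1) (pvDiffWitness_solution.2) ∧ Pre_solution (pvDiffWitness_solution.1) (pvDiffWitness_solution.2) ∧ D_solution (pvDiffWitness_solution.1) (pvDiffWitness_solution.2) ∧ solution (pvDiffWitness_solution.1) (pvDiffWitness_solution.2) = pvDiffWitnessOut_solution.1 ∧ solution_alt (pvDiffWitness_solution.1) (pvDiffWitness_solution.2) = pvDiffWitnessOut_solution.2 ∧ pvDiffWitnessOut_solution.1 ≠ pvDiffWitnessOut_solution.2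

-- ===== LEMMAS AND PROOFS =====

theorem pvHasMult_iff (a b w : Int) (hw : 0 < w) :
    pvHasMult a b w ↔ ∃ x, a ≤ x ∧ x ≤ b ∧ w ∣ x := by
  constructor
  · rintro ⟨hab, hle⟩
    refine ⟨w * PySem.Int.floordiv b w, hle, ?_, Dvd.intro _ rfl⟩
    have h1 := PySem.Int.floordiv_mul_add_mod b w
    have h2 : 0 ≤ PySem.Int.mod b w := by
      rw [PySem.Int.mod_eq_emod_of_pos hw]
      exact Int.emod_nonneg _ (ne_of_gt hw)
    rw [mul_comm]
    linarith
  · rintro ⟨x, hax, hxb, k, rfl⟩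
    refine ⟨le_trans hax hxb, ?_⟩
    have hk : k ≤ PySem.Int.floordiv b w := by
      rw [PySem.Int.le_floordiv_iff_mul_le hw]
      rw [mul_comm] at hxb
      exact hxb
    calc a ≤ w * k := hax
      _ ≤ w * PySem.Int.floordiv b w := mul_le_mul_of_nonneg_left hk (le_of_lt hw)

-- ---------- A-side characterisation ----------

theorem pvBump_natCast (a : List Int) (n : Nat) (h : n < a.length) :
    pvBump a (n : Int) = a.set n (a[n] + 1) := by
  simp [pvBump, List.getD_eq_getElem?_getD, List.getElem?_eq_getElem h]

theorem pvFoldBump_char (p : Int → Prop) [DecidablePred p] (L : List Int) (a : List Int)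
    (hnd : L.Nodup)
    (hb : ∀ x ∈ L, p x → 0 ≤ x ∧ x < (a.length : Int)) :
    (L.foldl (fun a idx => if p idx then pvBump a idx else a) a).length = a.length ∧
    ∀ n (hn : n < a.length),
      (L.foldl (fun a idx => if p idx then pvBump a idx else a) a)[n]? =
        some (a[n] + (if ((n : Int) ∈ L ∧ p (n : Int)) then 1 else 0)) := by
  induction L generalizing a with
  | nil =>
    refine ⟨rfl, fun n hn => ?_⟩
    simp [List.getElem?_eq_getElem hn]
  | cons x L ih =>
    by_cases hp : p x
    · obtain ⟨hx0, hxl⟩ := hb x (by simp) hp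
      set m := x.toNat with hmdef
      have hxm : x = (m : Int) := by omega
      have hm : m < a.length := by omega
      rw [hxm] at hp
      have hstep : (x :: L).foldl (fun a idx => if p idx then pvBump a idx else a) a
          = L.foldl (fun a idx => if p idx then pvBump a idx else a) (a.set m (a[m] + 1)) := by
        simp [List.foldl_cons, hxm, hp, pvBump_natCast a m hm]
      have hlen : (a.set m (a[m] + 1)).length = a.length := by simp
      obtain ⟨ih1, ih2⟩ := ih (a.set m (a[m] + 1)) hnd.of_cons
        (by intro y hy hpy; rw [hlen]; exact hb y (by simp [hy]) hpy)
      constructor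
      · rw [hstep, ih1, hlen]
      · intro n hn
        rw [hstep, ih2 n (by omega)]
        have hxL : x ∉ L := (List.nodup_cons.mp hnd).1
        by_cases hnm : n = m
        · subst hnm
          have hnotL : ((m : Int)) ∉ L := by rw [← hxm]; exact hxL
          simp [List.getElem_set_self, hnotL, hxm, hp]
        · have hne : (n : Int) ≠ x := by omega
          have : (a.set m (a[m] + 1))[n] = a[n] := by
            rw [List.getElem_set_ne (by omega)]
          rw [this]
          by_cases hmem : (n : Int) ∈ L <;> simp [hmem, hne]
    · have hstep : (x :: L).foldl (fun a idx => if p idx then pvBump a idx else a) a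
          = L.foldl (fun a idx => if p idx then pvBump a idx else a) a := by simp [hp]
      obtain ⟨ih1, ih2⟩ := ih a hnd.of_cons (fun y hy hpy => hb y (by simp [hy]) hpy)
      refine ⟨by rw [hstep, ih1], fun n hn => ?_⟩
      rw [hstep, ih2 n hn]
      have : ((n : Int) ∈ x :: L ∧ p (n : Int)) ↔ ((n : Int) ∈ L ∧ p (n : Int)) := by
        constructor
        · rintro ⟨hm, hpn⟩
          rcases List.mem_cons.mp hm with h | h
          · exact absurd (h ▸ hpn) hp
          · exact ⟨h, hpn⟩
        · exact fun ⟨hm, hpn⟩ => ⟨List.mem_cons_of_mem _ hm, hpn⟩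
      rw [if_congr this rfl rfl]

-- A characterized: position n ends at arr[n] plus one per query whose range hits n
theorem pvA_char (qs : List (Int × Int × Int)) : ∀ (a : List Int),
    (∀ q ∈ qs, ∀ x ∈ PySem.List.pyRange q.1 (q.2.1 + 1) 1,
      (q.1 ≤ x ∧ x ≤ q.2.1 ∧ PySem.Int.mod x q.2.2 = 0) → 0 ≤ x ∧ x < (a.length : Int)) →
    (solution a qs).length = a.length ∧
    ∀ n (hn : n < a.length), (solution a qs)[n]? =
      some (a[n] + (qs.map (fun q => if (q.1 ≤ (n : Int) ∧ (n : Int) ≤ q.2.1 ∧ PySem.Int.mod (n : Int) q.2.2 = 0) then (1 : Int) else 0)).sum) := by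
  induction qs with
  | nil =>
    intro a H
    refine ⟨rfl, fun n hn => ?_⟩
    simp [solution, List.getElem?_eq_getElem hn]
  | cons q qs ih =>
    intro a H
    obtain ⟨hl1, hget1⟩ := pvFoldBump_char
      (fun idx => q.1 ≤ idx ∧ idx ≤ q.2.1 ∧ PySem.Int.mod idx q.2.2 = 0)
      (PySem.List.pyRange q.1 (q.2.1 + 1) 1) a
      (PySem.List.nodup_pyRange_one _ _) (H q (List.mem_cons_self))
    set b := (PySem.List.pyRange q.1 (q.2.1 + 1) 1).foldl
      (fun a idx => if q.1 ≤ idx ∧ idx ≤ q.2.1 ∧ PySem.Int.mod idx q.2.2 = 0 then pvBump a idx else a) a with hb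
    have hstep : solution a (q :: qs) = solution b qs := rfl
    obtain ⟨ih1, ih2⟩ := ih b (by
      intro q' hq' x hx hc
      rw [hl1]
      exact H q' (List.mem_cons_of_mem _ hq') x hx hc)
    refine ⟨by rw [hstep, ih1, hl1], fun n hn => ?_⟩
    have hnb : n < b.length := by omega
    have hbn : b[n]'hnb = a[n] + (if ((n : Int) ∈ PySem.List.pyRange q.1 (q.2.1 + 1) 1 ∧
        (q.1 ≤ (n : Int) ∧ (n : Int) ≤ q.2.1 ∧ PySem.Int.mod (n : Int) q.2.2 = 0)) then 1 else 0) := by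
      have := hget1 n hn
      rw [List.getElem?_eq_getElem hnb] at this
      exact Option.some.inj this
    have hiff : ((n : Int) ∈ PySem.List.pyRange q.1 (q.2.1 + 1) 1 ∧
        (q.1 ≤ (n : Int) ∧ (n : Int) ≤ q.2.1 ∧ PySem.Int.mod (n : Int) q.2.2 = 0)) ↔
        (q.1 ≤ (n : Int) ∧ (n : Int) ≤ q.2.1 ∧ PySem.Int.mod (n : Int) q.2.2 = 0) := by
      constructor
      · exact fun h => h.2
      · exact fun h => ⟨PySem.List.mem_pyRange_one.mpr ⟨h.1, by omega⟩, h⟩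
    rw [hstep, ih2 n hnb, hbn, if_congr hiff rfl rfl]
    rw [List.map_cons, List.sum_cons, add_assoc]

-- ---------- B-side characterisation ----------

-- cnt after the double fold: each key counts its occurrences among all hit lists
theorem pvCnt_getD (qs : List (Int × Int × Int)) (d : PySem.Dict Int Int) (v : Int) :
    (qs.foldl (fun d q => (pvHits q).foldl (fun d k => d.modify k 0 (· + 1)) d) d).getD v 0
      = d.getD v 0 + (qs.map (fun q => ((pvHits q).count v : Int))).sum := by
  induction qs generalizing d with
  | nil => simp
  | cons q qs ih =>
    rw [List.foldl_cons, ih, PySem.Dict.getD_foldl_modify_add_one]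
    simp [add_assoc]

theorem pvHits_nodup (q : Int × Int × Int) : (pvHits q).Nodup := by
  unfold pvHits
  split
  · exact List.nodup_nil
  · rename_i h
    by_cases hz : q.2.2 = 0
    · simp [hz, PySem.List.pyRange]
    · have hw : 0 < |q.2.2| := abs_pos.mpr hz
      rw [PySem.List.pyRange_of_pos _ _ hw]
      refine List.Nodup.map ?_ List.nodup_range
      intro a b hab
      simp only at hab
      have := mul_left_cancel₀ (ne_of_gt hw) (add_left_cancel hab)
      exact_mod_cast this

-- a query's hit list contains v exactly when A's guard accepts v for that query
theorem pvHits_mem (q : Int × Int × Int) (hz : q.1 ≤ q.2.1 → q.2.2 ≠ 0) (v : Int) :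
    v ∈ pvHits q ↔ (q.1 ≤ v ∧ v ≤ q.2.1 ∧ PySem.Int.mod v q.2.2 = 0) := by
  unfold pvHits
  split
  · rename_i h
    simp only [List.not_mem_nil, false_iff]
    omega
  · rename_i h
    have hij : q.1 ≤ q.2.1 := by omega
    have hz' : q.2.2 ≠ 0 := hz hij
    have hw : 0 < |q.2.2| := abs_pos.mpr hz'
    set w := |q.2.2| with hwdef
    set s := -(PySem.Int.floordiv (-q.1) w) * w with hs
    have hds : w ∣ s := ⟨-(PySem.Int.floordiv (-q.1) w), by rw [hs]; ring⟩
    have hmod := PySem.Int.floordiv_mul_add_mod (-q.1) w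
    have hr0 : 0 ≤ PySem.Int.mod (-q.1) w := by
      rw [PySem.Int.mod_eq_emod_of_pos hw]; exact Int.emod_nonneg _ (ne_of_gt hw)
    have hrw : PySem.Int.mod (-q.1) w < w := by
      rw [PySem.Int.mod_eq_emod_of_pos hw]; exact Int.emod_lt_of_pos _ hw
    have hs' : s = -(PySem.Int.floordiv (-q.1) w * w) := by rw [hs]; ring
    have hsb : q.1 ≤ s ∧ s < q.1 + w := by omega
    rw [PySem.List.mem_pyRange_iff_of_pos hw]
    constructor
    · rintro ⟨h1, h2, h3⟩
      have hdv : w ∣ v := by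
        have h := dvd_add hds h3
        have he : s + (v - s) = v := by ring
        rwa [he] at h
      refine ⟨by omega, by omega, ?_⟩
      rw [PySem.Int.mod_eq_zero_iff_dvd]
      exact (abs_dvd _ _).mp hdv
    · rintro ⟨h1, h2, h3⟩
      have hdv : w ∣ v := (abs_dvd _ _).mpr ((PySem.Int.mod_eq_zero_iff_dvd _ _).mp h3)
      have hsv : s ≤ v := by
        by_contra hlt
        have hdvs : w ∣ s - v := dvd_sub hds hdv
        have : w ≤ s - v := Int.le_of_dvd (by omega) hdvs
        omega
      exact ⟨hsv, by omega, dvd_sub hdv hds⟩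

theorem pvHits_count (q : Int × Int × Int) (hz : q.1 ≤ q.2.1 → q.2.2 ≠ 0) (v : Int) :
    ((pvHits q).count v : Int)
      = if (q.1 ≤ v ∧ v ≤ q.2.1 ∧ PySem.Int.mod v q.2.2 = 0) then 1 else 0 := by
  by_cases hmem : v ∈ pvHits q
  · rw [if_pos ((pvHits_mem q hz v).mp hmem)]
    exact_mod_cast List.count_eq_one_of_mem (pvHits_nodup q) hmem
  · rw [if_neg (fun hc => hmem ((pvHits_mem q hz v).mpr hc))]
    exact_mod_cast List.count_eq_zero_of_not_mem hmem

-- `arr[n] += c` at a valid nonnegative index, written as B's final pass writes it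
theorem pvWrite_natCast (a : List Int) (c : Int) (n : Nat) (h : n < a.length) :
    PySem.List.pySetD a (n : Int) (PySem.List.pyGetD a (n : Int) 0 + c) = a.set n (a[n] + c) := by
  simp [List.getD_eq_getElem?_getD, List.getElem?_eq_getElem h]

-- the apply pass: each listed position gains c at that position, each once
theorem pvApply_char (c : Int → Int) (M : List Nat) (a : List Int)
    (hnd : M.Nodup) (hM : ∀ m ∈ M, m < a.length) :
    (M.foldl (fun a m => PySem.List.pySetD a ((m : Nat) : Int)
        (PySem.List.pyGetD a ((m : Nat) : Int) 0 + c ((m : Nat) : Int))) a).length = a.length ∧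
    ∀ n (hn : n < a.length),
      (M.foldl (fun a m => PySem.List.pySetD a ((m : Nat) : Int)
        (PySem.List.pyGetD a ((m : Nat) : Int) 0 + c ((m : Nat) : Int))) a)[n]? =
        some (a[n] + (if n ∈ M then c ((n : Nat) : Int) else 0)) := by
  induction M generalizing a with
  | nil =>
    refine ⟨rfl, fun n hn => ?_⟩
    simp [List.getElem?_eq_getElem hn]
  | cons m M ih =>
    have hm : m < a.length := hM m (by simp)
    have hstep : ((m :: M).foldl (fun a m => PySem.List.pySetD a ((m : Nat) : Int)
          (PySem.List.pyGetD a ((m : Nat) : Int) 0 + c ((m : Nat) : Int))) a)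
        = M.foldl (fun a m => PySem.List.pySetD a ((m : Nat) : Int)
          (PySem.List.pyGetD a ((m : Nat) : Int) 0 + c ((m : Nat) : Int))) (a.set m (a[m] + c (m : Int))) := by
      rw [List.foldl_cons, pvWrite_natCast a (c (m : Int)) m hm]
    have hlen : (a.set m (a[m] + c (m : Int))).length = a.length := by simp
    obtain ⟨ih1, ih2⟩ := ih (a.set m (a[m] + c (m : Int))) hnd.of_cons
      (by intro y hy; rw [hlen]; exact hM y (by simp [hy]))
    refine ⟨by rw [hstep, ih1, hlen], fun n hn => ?_⟩
    rw [hstep, ih2 n (by omega)]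
    have hmM : m ∉ M := (List.nodup_cons.mp hnd).1
    by_cases hnm : n = m
    · subst hnm
      simp [List.getElem_set_self (by simpa using hm), hmM]
    · have hmn : m ≠ n := fun h => hnm h.symm
      simp only [List.getElem_set_ne hmn]
      by_cases hmem : n ∈ M <;> simp [hmem, hnm]

-- B characterized the same way as A
theorem pvB_char (qs : List (Int × Int × Int)) (a : List Int)
    (hz : ∀ q ∈ qs, q.1 ≤ q.2.1 → q.2.2 ≠ 0) :
    (solution_alt a qs).length = a.length ∧
    ∀ n (hn : n < a.length), (solution_alt a qs)[n]? =
      some (a[n] + (qs.map (fun q => if (q.1 ≤ (n : Int) ∧ (n : Int) ≤ q.2.1 ∧ PySem.Int.mod (n : Int) q.2.2 = 0) then (1 : Int) else 0)).sum) := by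
  set cnt : PySem.Dict Int Int := qs.foldl (fun d q => (pvHits q).foldl (fun d k => d.modify k 0 (· + 1)) d) PySem.Dict.empty with hcnt
  have hrange : PySem.List.pyRange 0 (a.length : Int) 1 = (List.range a.length).map (fun k => ((k : Nat) : Int)) := by
    rw [PySem.List.pyRange_one]
    simp
  have hfold : solution_alt a qs =
      (List.range a.length).foldl (fun a m => PySem.List.pySetD a ((m : Nat) : Int)
        (PySem.List.pyGetD a ((m : Nat) : Int) 0 + cnt.getD ((m : Nat) : Int) 0)) a := by
    rw [solution_alt, hrange, List.foldl_map]
  have hcv : ∀ v : Int, cnt.getD v 0 =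
      (qs.map (fun q => if (q.1 ≤ v ∧ v ≤ q.2.1 ∧ PySem.Int.mod v q.2.2 = 0) then (1 : Int) else 0)).sum := by
    intro v
    rw [hcnt, pvCnt_getD]
    have hd : (PySem.Dict.empty : PySem.Dict Int Int).getD v 0 = 0 := rfl
    rw [hd, zero_add]
    congr 1
    exact List.map_congr_left (fun q hq => pvHits_count q (hz q hq) v)
  obtain ⟨h1, h2⟩ := pvApply_char (fun v => cnt.getD v 0) (List.range a.length) a
    List.nodup_range (by intro m hm; simpa using hm)
  refine ⟨by rw [hfold, h1], fun n hn => ?_⟩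
  rw [hfold, h2 n hn, if_pos (List.mem_range.mpr hn), hcv (n : Int)]

-- ---------- wrap-aware A-side lemmas (for the tightness proof) ----------

-- Python index resolution for a valid (possibly negative) index
def pvResolve (len : Nat) (i : Int) : Nat := if 0 ≤ i then i.toNat else len - (-i).toNat

theorem pvBump_resolve (a : List Int) (i : Int) (h1 : -(a.length : Int) ≤ i) (h2 : i < (a.length : Int)) :
    pvBump a i = a.set (pvResolve a.length i) (a.getD (pvResolve a.length i) 0 + 1) := by
  by_cases h0 : 0 ≤ i
  · have ht : i.toNat < a.length := by omega
    simp [pvBump, PySem.List.pySetD, PySem.List.pySet?, PySem.List.pyGetD, PySem.List.pyGet?,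
      PySem.List.pyIdx?, pvResolve, h0, h2, List.getD_eq_getElem?_getD]
  · have hidx : PySem.List.pyIdx? a.length i = some (a.length - (-i).toNat) := by
      simp [PySem.List.pyIdx?, h0, h1]
    have hr : a.length - (-i).toNat < a.length := by omega
    simp [pvBump, PySem.List.pySetD, PySem.List.pySet?, PySem.List.pyGetD, PySem.List.pyGet?,
      hidx, pvResolve, h0, List.getD_eq_getElem?_getD]

theorem pvResolve_lt (len : Nat) (i : Int) (_h1 : -(len : Int) ≤ i) (h2 : i < (len : Int)) (h3 : 0 < len) :
    pvResolve len i < len := by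
  unfold pvResolve; split <;> omega

-- wrap-aware version of pvFoldBump_char: each valid index lands at its resolved position
theorem pvFoldBumpWrap_char (p : Int → Prop) [DecidablePred p] (L : List Int) (a : List Int)
    (hb : ∀ x ∈ L, p x → -(a.length : Int) ≤ x ∧ x < (a.length : Int)) :
    (L.foldl (fun a idx => if p idx then pvBump a idx else a) a).length = a.length ∧
    ∀ n (hn : n < a.length),
      (L.foldl (fun a idx => if p idx then pvBump a idx else a) a)[n]? =
        some (a[n] + (L.countP (fun x => decide (p x ∧ pvResolve a.length x = n)) : Int)) := by
  induction L generalizing a with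
  | nil =>
    refine ⟨rfl, fun n hn => ?_⟩
    simp [List.getElem?_eq_getElem hn]
  | cons x L ih =>
    by_cases hp : p x
    · obtain ⟨hx1, hx2⟩ := hb x (by simp) hp
      have hlen0 : 0 < a.length := by omega
      set m := pvResolve a.length x with hm
      have hmlt : m < a.length := pvResolve_lt a.length x hx1 hx2 hlen0
      have hgd : a.getD m 0 = a[m] := List.getD_eq_getElem a 0 hmlt
      have hstep : (x :: L).foldl (fun a idx => if p idx then pvBump a idx else a) a
          = L.foldl (fun a idx => if p idx then pvBump a idx else a) (a.set m (a[m] + 1)) := by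
        rw [List.foldl_cons, if_pos hp, pvBump_resolve a x hx1 hx2, ← hm, hgd]
      have hlen : (a.set m (a[m] + 1)).length = a.length := by simp
      obtain ⟨ih1, ih2⟩ := ih (a.set m (a[m] + 1))
        (by intro y hy hpy; rw [hlen]; exact hb y (by simp [hy]) hpy)
      constructor
      · rw [hstep, ih1, hlen]
      · intro n hn
        rw [hstep, ih2 n (by omega)]
        have hres : pvResolve (a.set m (a[m] + 1)).length = pvResolve a.length := by rw [hlen]
        rw [hres, List.countP_cons]
        by_cases hnm : n = m
        · subst hnm
          simp [List.getElem_set_self (by simpa using hmlt), hp, ← hm]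
          omega
        · have hgne : (a.set m (a[m] + 1))[n]'(by omega) = a[n] := by
            rw [List.getElem_set_ne (by omega)]
          simp only [hgne]
          have hnot : ¬ (p x ∧ pvResolve a.length x = n) := by
            rw [← hm]; exact fun h => hnm h.2.symm
          simp [hnot]
    · have hstep : (x :: L).foldl (fun a idx => if p idx then pvBump a idx else a) a
          = L.foldl (fun a idx => if p idx then pvBump a idx else a) a := by simp [hp]
      obtain ⟨ih1, ih2⟩ := ih a (fun y hy hpy => hb y (by simp [hy]) hpy)
      refine ⟨by rw [hstep, ih1], fun n hn => ?_⟩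
      rw [hstep, ih2 n hn, List.countP_cons]
      have : ¬ (p x ∧ pvResolve a.length x = n) := fun h => hp h.1
      simp [this]

-- A characterized with wraps: position n gains one per (query, hit) pair resolving to n
theorem pvA_wrap_char (qs : List (Int × Int × Int)) : ∀ (a : List Int),
    (∀ q ∈ qs, ∀ x ∈ PySem.List.pyRange q.1 (q.2.1 + 1) 1,
      (q.1 ≤ x ∧ x ≤ q.2.1 ∧ PySem.Int.mod x q.2.2 = 0) → -(a.length : Int) ≤ x ∧ x < (a.length : Int)) →
    (solution a qs).length = a.length ∧
    ∀ n (hn : n < a.length), (solution a qs)[n]? =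
      some (a[n] + (qs.map (fun q => ((PySem.List.pyRange q.1 (q.2.1 + 1) 1).countP
        (fun x => decide ((q.1 ≤ x ∧ x ≤ q.2.1 ∧ PySem.Int.mod x q.2.2 = 0) ∧ pvResolve a.length x = n)) : Int))).sum) := by
  induction qs with
  | nil =>
    intro a H
    refine ⟨rfl, fun n hn => ?_⟩
    simp [solution, List.getElem?_eq_getElem hn]
  | cons q qs ih =>
    intro a H
    obtain ⟨hl1, hget1⟩ := pvFoldBumpWrap_char
      (fun idx => q.1 ≤ idx ∧ idx ≤ q.2.1 ∧ PySem.Int.mod idx q.2.2 = 0)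
      (PySem.List.pyRange q.1 (q.2.1 + 1) 1) a (H q (List.mem_cons_self))
    set b := (PySem.List.pyRange q.1 (q.2.1 + 1) 1).foldl
      (fun a idx => if q.1 ≤ idx ∧ idx ≤ q.2.1 ∧ PySem.Int.mod idx q.2.2 = 0 then pvBump a idx else a) a with hb
    have hstep : solution a (q :: qs) = solution b qs := rfl
    obtain ⟨ih1, ih2⟩ := ih b (by
      intro q' hq' x hx hc
      rw [hl1]
      exact H q' (List.mem_cons_of_mem _ hq') x hx hc)
    refine ⟨by rw [hstep, ih1, hl1], fun n hn => ?_⟩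
    have hnb : n < b.length := by omega
    have hbn : b[n]'hnb = a[n] + ((PySem.List.pyRange q.1 (q.2.1 + 1) 1).countP
        (fun x => decide ((q.1 ≤ x ∧ x ≤ q.2.1 ∧ PySem.Int.mod x q.2.2 = 0) ∧ pvResolve a.length x = n)) : Int) := by
      have := hget1 n hn
      rw [List.getElem?_eq_getElem hnb] at this
      exact Option.some.inj this
    rw [hstep, ih2 n hnb, hbn, hl1]
    rw [List.map_cons, List.sum_cons, add_assoc]

-- two distinct members give length ≥ 2
theorem pvTwo_le_length {α : Type} [DecidableEq α] {l : List α} {x y : α}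
    (hx : x ∈ l) (hy : y ∈ l) (hne : x ≠ y) : 2 ≤ l.length := by
  have hy' : y ∈ l.erase x := List.mem_erase_of_ne (Ne.symm hne) |>.mpr hy
  have h1 : 1 ≤ (l.erase x).length := List.length_pos_of_mem hy'
  have h2 := List.length_erase_of_mem hx
  omega

-- ===== VERDICT (by name: the statement is the Claim_ definition above) =====
theorem solution_spec : Claim_unchanged_solution := by
  intro arr queries hdom hpre
  unfold Spec_solution
  intro hd
  unfold Pre_solution at hpre
  unfold D_solution at hd
  have H : ∀ q ∈ queries, ∀ x ∈ PySem.List.pyRange q.1 (q.2.1 + 1) 1,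
      (q.1 ≤ x ∧ x ≤ q.2.1 ∧ PySem.Int.mod x q.2.2 = 0) → 0 ≤ x ∧ x < (arr.length : Int) := by
    intro q hq x hx hc
    obtain ⟨hix, hxj, hmod⟩ := hc
    have hz : q.2.2 ≠ 0 := (hpre q hq).1 (le_trans hix hxj)
    have hw : 0 < |q.2.2| := abs_pos.mpr hz
    have hdvd : |q.2.2| ∣ x := (abs_dvd _ _).mpr ((PySem.Int.mod_eq_zero_iff_dvd _ _).mp hmod)
    have hx0 : 0 ≤ x := by
      by_contra hneg
      exact hd ⟨q, hq, hz, (pvHasMult_iff _ _ _ hw).mpr ⟨x, hix, le_min hxj (by omega), hdvd⟩⟩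
    refine ⟨hx0, ?_⟩
    by_contra hge
    exact (hpre q hq).2.2 ((pvHasMult_iff _ _ _ hw).mpr ⟨x, max_le hix (by omega), hxj, hdvd⟩)
  obtain ⟨ha1, ha2⟩ := pvA_char queries arr H
  obtain ⟨hb1, hb2⟩ := pvB_char queries arr (fun q hq => (hpre q hq).1)
  apply List.ext_getElem?
  intro n
  by_cases hn : n < arr.length
  · rw [ha2 n hn, hb2 n hn]
  · rw [List.getElem?_eq_none (by omega : (solution arr queries).length ≤ n),
        List.getElem?_eq_none (by omega : (solution_alt arr queries).length ≤ n)]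

theorem solution_changed : Claim_changed_solution := by
  unfold Claim_changed_solution; decide

theorem solution_tight : Claim_exact_solution := by
  intro arr queries hdom hpre hD
  unfold Pre_solution at hpre
  unfold D_solution at hD
  intro hEq
  obtain ⟨q, hq, hz, hmult⟩ := hD
  have hw : 0 < |q.2.2| := abs_pos.mpr hz
  obtain ⟨x, hix, hxmin, hdvd⟩ := (pvHasMult_iff _ _ _ hw).mp hmult
  have hxj : x ≤ q.2.1 := le_trans hxmin (min_le_left _ _)
  have hxneg : x ≤ -1 := le_trans hxmin (min_le_right _ _)
  have hmodx : PySem.Int.mod x q.2.2 = 0 :=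
    (PySem.Int.mod_eq_zero_iff_dvd _ _).mpr ((abs_dvd _ _).mp hdvd)
  have hxlo : -(arr.length : Int) ≤ x := by
    by_contra hlo
    exact (hpre q hq).2.1 ((pvHasMult_iff _ _ _ hw).mpr ⟨x, hix, le_min hxj (by omega), hdvd⟩)
  have hlen0 : 0 < arr.length := by omega
  have HInR : ∀ q' ∈ queries, ∀ y ∈ PySem.List.pyRange q'.1 (q'.2.1 + 1) 1,
      (q'.1 ≤ y ∧ y ≤ q'.2.1 ∧ PySem.Int.mod y q'.2.2 = 0) →
      -(arr.length : Int) ≤ y ∧ y < (arr.length : Int) := by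
    intro q' hq' y hy hc
    obtain ⟨hiy, hyj, hmod⟩ := hc
    have hz' : q'.2.2 ≠ 0 := (hpre q' hq').1 (le_trans hiy hyj)
    have hw' : 0 < |q'.2.2| := abs_pos.mpr hz'
    have hdvd' : |q'.2.2| ∣ y := (abs_dvd _ _).mpr ((PySem.Int.mod_eq_zero_iff_dvd _ _).mp hmod)
    constructor
    · by_contra hlo
      exact (hpre q' hq').2.1 ((pvHasMult_iff _ _ _ hw').mpr ⟨y, hiy, le_min hyj (by omega), hdvd'⟩)
    · by_contra hge
      exact (hpre q' hq').2.2 ((pvHasMult_iff _ _ _ hw').mpr ⟨y, max_le hiy (by omega), hyj, hdvd'⟩)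
  obtain ⟨ha1, ha2⟩ := pvA_wrap_char queries arr HInR
  obtain ⟨hb1, hb2⟩ := pvB_char queries arr (fun q' hq' => (hpre q' hq').1)
  set p := pvResolve arr.length x with hp
  have hplt : p < arr.length := pvResolve_lt arr.length x hxlo (by omega) hlen0
  have hpx : pvResolve arr.length x = p := rfl
  have hA := ha2 p hplt
  have hB := hb2 p hplt
  rw [hEq, hB] at hA
  have hsum := Option.some.inj hA
  have hlt : ((queries.map (fun q => if (q.1 ≤ (p : Int) ∧ (p : Int) ≤ q.2.1 ∧ PySem.Int.mod (p : Int) q.2.2 = 0) then (1 : Int) else 0)).sum)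
      < (queries.map (fun q => ((PySem.List.pyRange q.1 (q.2.1 + 1) 1).countP
        (fun y => decide ((q.1 ≤ y ∧ y ≤ q.2.1 ∧ PySem.Int.mod y q.2.2 = 0) ∧ pvResolve arr.length y = p)) : Int))).sum := by
    apply List.sum_lt_sum
    · intro q' hq'
      by_cases hcp : q'.1 ≤ (p : Int) ∧ (p : Int) ≤ q'.2.1 ∧ PySem.Int.mod (p : Int) q'.2.2 = 0
      · rw [if_pos hcp]
        have hmem : (p : Int) ∈ PySem.List.pyRange q'.1 (q'.2.1 + 1) 1 :=
          PySem.List.mem_pyRange_one.mpr ⟨hcp.1, by omega⟩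
        have hres : pvResolve arr.length (p : Int) = p := by unfold pvResolve; simp
        have : 0 < (PySem.List.pyRange q'.1 (q'.2.1 + 1) 1).countP
            (fun y => decide ((q'.1 ≤ y ∧ y ≤ q'.2.1 ∧ PySem.Int.mod y q'.2.2 = 0) ∧ pvResolve arr.length y = p)) :=
          List.countP_pos_iff.mpr ⟨(p : Int), hmem, by simp [hcp, hres]⟩
        omega
      · rw [if_neg hcp]
        positivity
    · refine ⟨q, hq, ?_⟩
      have hmemx : x ∈ PySem.List.pyRange q.1 (q.2.1 + 1) 1 :=
        PySem.List.mem_pyRange_one.mpr ⟨hix, by omega⟩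
      have hcx : (q.1 ≤ x ∧ x ≤ q.2.1 ∧ PySem.Int.mod x q.2.2 = 0) ∧ pvResolve arr.length x = p :=
        ⟨⟨hix, hxj, hmodx⟩, hpx⟩
      by_cases hcp : q.1 ≤ (p : Int) ∧ (p : Int) ≤ q.2.1 ∧ PySem.Int.mod (p : Int) q.2.2 = 0
      · rw [if_pos hcp]
        have hmem : (p : Int) ∈ PySem.List.pyRange q.1 (q.2.1 + 1) 1 :=
          PySem.List.mem_pyRange_one.mpr ⟨hcp.1, by omega⟩
        have hres : pvResolve arr.length (p : Int) = p := by unfold pvResolve; simp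
        have hxf : x ∈ (PySem.List.pyRange q.1 (q.2.1 + 1) 1).filter
            (fun y => decide ((q.1 ≤ y ∧ y ≤ q.2.1 ∧ PySem.Int.mod y q.2.2 = 0) ∧ pvResolve arr.length y = p)) :=
          List.mem_filter.mpr ⟨hmemx, by simp [hcx]⟩
        have hpf : (p : Int) ∈ (PySem.List.pyRange q.1 (q.2.1 + 1) 1).filter
            (fun y => decide ((q.1 ≤ y ∧ y ≤ q.2.1 ∧ PySem.Int.mod y q.2.2 = 0) ∧ pvResolve arr.length y = p)) :=
          List.mem_filter.mpr ⟨hmem, by simp [hcp, hres]⟩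
        have hne : x ≠ (p : Int) := by omega
        have h2 := pvTwo_le_length hxf hpf hne
        rw [List.countP_eq_length_filter]
        omega
      · rw [if_neg hcp]
        have : 0 < (PySem.List.pyRange q.1 (q.2.1 + 1) 1).countP
            (fun y => decide ((q.1 ≤ y ∧ y ≤ q.2.1 ∧ PySem.Int.mod y q.2.2 = 0) ∧ pvResolve arr.length y = p)) :=
          List.countP_pos_iff.mpr ⟨x, hmemx, by simp [hcx]⟩
        omega
  omega
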